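-- pv_equiv track=rewrite | github.com/Kui2ei/FTI | codesignOrion&Bs.py | _factorizations_of_power_of_two
-- ===== SOURCE A (Python) =====
-- from typing import Dict, Iterable, List, Sequence, Set, Tuple
--
-- def _factorizations_of_power_of_two(total_log_slots: int, levels: int, min_log_step: int = 1) -> List[Tuple[int, ...]]:
--     if levels <= 0:
--         return []
--     results: List[Tuple[int, ...]] = []
--
--     def rec(remaining: int, depth: int, prefix: List[int]) -> None:
--         if depth == levels:
--             if remaining == 0:
--                 results.append(tuple(1 << x for x in prefix))
--             return
--
--         min_required = (levels - depth - 1) * min_log_step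
--         max_here = remaining - min_required
--         for current in range(min_log_step, max_here + 1):
--             prefix.append(current)
--             rec(remaining - current, depth + 1, prefix)
--             prefix.pop()
--
--     rec(total_log_slots, 0, [])
--     return results
-- ===== SOURCE B (Python) =====
-- from itertools import combinations
-- from typing import List, Tuple
--
--
-- def _factorizations_of_power_of_two(total_log_slots: int, levels: int, min_log_step: int = 1) -> List[Tuple[int, ...]]:
--     if levels <= 0:
--         return []
--     S = total_log_slots - levels * min_log_step
--     if S < 0:
--         return []
--     n = S + levels - 1
--     results: List[Tuple[int, ...]] = []
--     for dividers in combinations(range(n), levels - 1):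
--         prev = -1
--         exponents: List[int] = []
--         for d in list(dividers) + [n]:
--             exponents.append(d - prev - 1 + min_log_step)
--             prev = d
--         results.append(tuple(1 << e for e in exponents))
--     return results
-- ===== Notes on version B (the rewrite author's own statement) =====
-- stated objective: alternative
-- what changed: Replaced A's pruned depth-first recursion over exponent prefixes by a stars-and-bars enumeration: pick levels-1 divider positions with itertools.combinations and turn consecutive gaps into the exponents, producing the same compositions in the same lexicographic order.
import Mathlib
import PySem

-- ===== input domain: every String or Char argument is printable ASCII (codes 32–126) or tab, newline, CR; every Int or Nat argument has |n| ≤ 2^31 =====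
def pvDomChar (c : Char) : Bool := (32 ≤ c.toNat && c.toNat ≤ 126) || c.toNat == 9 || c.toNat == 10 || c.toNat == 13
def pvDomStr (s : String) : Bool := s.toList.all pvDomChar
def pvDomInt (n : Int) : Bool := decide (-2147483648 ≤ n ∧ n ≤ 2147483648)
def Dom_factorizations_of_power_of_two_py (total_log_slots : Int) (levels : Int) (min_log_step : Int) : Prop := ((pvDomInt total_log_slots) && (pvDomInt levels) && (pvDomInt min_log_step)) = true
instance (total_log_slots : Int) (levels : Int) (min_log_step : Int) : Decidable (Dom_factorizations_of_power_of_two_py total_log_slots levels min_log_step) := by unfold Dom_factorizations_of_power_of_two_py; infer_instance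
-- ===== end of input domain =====

-- B replaces A's pruned depth-first recursion by a stars-and-bars enumeration: it picks
-- divider positions with combinations(range(S+levels-1), levels-1) and turns the gaps into
-- exponents (objective: alternative algorithm, same enumeration order).

-- ===== PORT A =====

-- Python's '1 << x'; exact for 0 ≤ x.  For x < 0 Python raises ValueError — such inputs
-- are excluded by Pre_ below, so the 0 returned there is never relied on.
def pyShl1 (x : Int) : Int := if x < 0 then 0 else 2 ^ x.toNat

-- the inner 'rec'; fuel = levels - depth (levels at the top call), so 'fuel = 0' is
-- exactly Python's 'depth == levels' test
def recA (levels m : Int) : Nat → Int → Int → List Int → List (List Int)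
  | 0, remaining, _depth, pre =>
      if remaining = 0 then [pre.map pyShl1] else []
  | fuel+1, remaining, depth, pre =>
      (PySem.List.pyRange m (remaining - (levels - depth - 1) * m + 1) 1).foldl
        (fun acc current =>
          acc ++ recA levels m fuel (remaining - current) (depth + 1) (pre ++ [current])) []

def factorizations_of_power_of_two_py (total_log_slots : Int) (levels : Int) (min_log_step : Int) : List (List Int) :=
  if levels ≤ 0 then []
  else recA levels min_log_step levels.toNat total_log_slots 0 []

-- ===== PORT B =====

-- itertools.combinations(l, k) in lexicographic order
def combs : List Int → Nat → List (List Int)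
  | _, 0 => [[]]
  | [], _+1 => []
  | x :: rest, k+1 => ((combs rest k).map (fun c => x :: c)) ++ combs rest (k+1)

-- the inner 'for d in list(dividers) + [n]' loop of Source B, carrying 'prev'
def gapsLoop (m : Int) : Int → List Int → List Int
  | _, [] => []
  | prev, d :: ds => (d - prev - 1 + m) :: gapsLoop m d ds

def factorizations_of_power_of_two_py_alt (total_log_slots : Int) (levels : Int) (min_log_step : Int) : List (List Int) :=
  if levels ≤ 0 then []
  else
    let S := total_log_slots - levels * min_log_step
    if S < 0 then []
    else
      let n := S + levels - 1
      (combs (PySem.List.pyRange 0 n 1) (levels - 1).toNat).map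
        (fun ds => (gapsLoop min_log_step (-1) (ds ++ [n])).map pyShl1)

-- ===== PRECONDITION & SPEC =====
-- Pre_ excludes exactly the inputs on which Python A raises ValueError ('1 << x' with a
-- negative exponent): min_log_step < 0 with levels ≥ 2 and total_log_slots ≥ levels*min_log_step,
-- or levels = 1 with min_log_step ≤ total_log_slots < 0.  A returns on every input of Pre_.
def Pre_factorizations_of_power_of_two_py (total_log_slots : Int) (levels : Int) (min_log_step : Int) : Prop :=
  0 ≤ min_log_step ∨ levels ≤ 0 ∨
  (levels = 1 ∧ (total_log_slots < min_log_step ∨ 0 ≤ total_log_slots)) ∨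
  (2 ≤ levels ∧ total_log_slots < levels * min_log_step)
instance (total_log_slots : Int) (levels : Int) (min_log_step : Int) : Decidable (Pre_factorizations_of_power_of_two_py total_log_slots levels min_log_step) := by unfold Pre_factorizations_of_power_of_two_py; infer_instance

def pvWitness_factorizations_of_power_of_two_py : Int × Int × Int := (6, 2, 1)

def Spec_factorizations_of_power_of_two_py (total_log_slots : Int) (levels : Int) (min_log_step : Int) (out : List (List Int)) : Prop := out = factorizations_of_power_of_two_py_alt total_log_slots levels min_log_step
instance (total_log_slots : Int) (levels : Int) (min_log_step : Int) (out : List (List Int)) : Decidable (Spec_factorizations_of_power_of_two_py total_log_slots levels min_log_step out) := by unfold Spec_factorizations_of_power_of_two_py; infer_instance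

-- ===== CLAIM (what is proved, stated in full; the proofs are below) =====
def Claim_equal_factorizations_of_power_of_two_py : Prop := ∀ (total_log_slots : Int) (levels : Int) (min_log_step : Int), Dom_factorizations_of_power_of_two_py total_log_slots levels min_log_step → Pre_factorizations_of_power_of_two_py total_log_slots levels min_log_step → Spec_factorizations_of_power_of_two_py total_log_slots levels min_log_step (factorizations_of_power_of_two_py total_log_slots levels min_log_step)

-- ===== LEMMAS AND PROOFS =====

-- exponent-level view of recA: drop the pre accumulator and the final 1<<· map
def recE (m : Int) : Nat → Int → List (List Int)
  | 0, r => if r = 0 then [[]] else []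
  | k+1, r =>
      (PySem.List.pyRange m (r - (k : Int) * m + 1) 1).flatMap
        (fun c => (recE m k (r - c)).map (fun e => c :: e))

theorem flatMap_congr' {α β : Type} (l : List α) (f g : α → List β)
    (h : ∀ x ∈ l, f x = g x) : l.flatMap f = l.flatMap g := by
  induction l with
  | nil => rfl
  | cons a t ih =>
      simp only [List.flatMap_cons]
      rw [h a (by simp), ih (fun x hx => h x (by simp [hx]))]

theorem recA_eq_recE (levels m : Int) : ∀ (fuel : Nat) (r depth : Int) (pre : List Int),
    levels - depth = (fuel : Int) →
    recA levels m fuel r depth pre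
      = (recE m fuel r).map (fun e => (pre ++ e).map pyShl1) := by
  intro fuel
  induction fuel with
  | zero =>
      intro r depth pre _
      simp only [recA, recE]
      split_ifs <;> simp
  | succ k ih =>
      intro r depth pre h
      have hd : levels - depth - 1 = (k : Int) := by push_cast at h ⊢; omega
      simp only [recA, recE, PySem.List.foldl_append_eq_flatMap, List.nil_append, hd]
      rw [List.map_flatMap]
      refine flatMap_congr' _ _ _ (fun c _ => ?_)
      rw [ih (r - c) (depth + 1) (pre ++ [c]) (by push_cast at h ⊢; omega)]
      simp [List.map_map, Function.comp]

theorem combs_short : ∀ (l : List Int) (k : Nat), l.length < k → combs l k = [] := by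
  intro l
  induction l with
  | nil => intro k hk; match k, hk with | _+1, _ => rfl
  | cons x rest ih =>
      intro k hk
      match k, hk with
      | k+1, hk =>
        simp only [combs]
        rw [ih k (by simpa using hk), ih (k+1) (by simp at hk ⊢; omega)]
        rfl

theorem combs_map (f : Int → Int) : ∀ (l : List Int) (k : Nat),
    combs (l.map f) k = (combs l k).map (List.map f) := by
  intro l
  induction l with
  | nil => intro k; cases k <;> simp [combs]
  | cons x rest ih =>
      intro k
      cases k with
      | zero => simp [combs]
      | succ k => simp [combs, ih, List.map_map, Function.comp]

theorem pyRange_shift0 (b t : Int) :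
    PySem.List.pyRange t (b + t) 1 = (PySem.List.pyRange 0 b 1).map (· + t) := by
  rw [PySem.List.pyRange_one, PySem.List.pyRange_one]
  have hb : b + t - t = b - 0 := by ring
  rw [hb, List.map_map]
  exact List.map_congr_left (fun k _ => by simp; ring)

theorem combs_decomp : ∀ (t k : Nat) (a n : Int), (n - a).toNat ≤ t →
    combs (PySem.List.pyRange a n 1) (k+1)
      = (PySem.List.pyRange a (n - k) 1).flatMap
          (fun d => (combs (PySem.List.pyRange (d+1) n 1) k).map (fun ds => d :: ds)) := by
  intro t
  induction t with
  | zero =>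
      intro k a n h
      rw [PySem.List.pyRange_one_eq_nil (a := a) (b := n) (by omega),
          PySem.List.pyRange_one_eq_nil (a := a) (b := n - k) (by omega)]
      rfl
  | succ t ih =>
      intro k a n h
      by_cases hak : n - k ≤ a
      · rw [combs_short _ _ (by rw [PySem.List.length_pyRange_one]; omega),
            PySem.List.pyRange_one_eq_nil hak]
        rfl
      · have han : a < n := by omega
        rw [PySem.List.pyRange_one_cons han, PySem.List.pyRange_one_cons (by omega : a < n - k)]
        simp only [combs, List.flatMap_cons]
        rw [ih k (a+1) n (by omega)]

theorem flatMap_pick : ∀ (t : Nat) (a b r : Int), (b - a).toNat ≤ t →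
    (PySem.List.pyRange a b 1).flatMap
        (fun c => if r - c = 0 then ([[c]] : List (List Int)) else [])
      = if a ≤ r ∧ r < b then [[r]] else [] := by
  intro t
  induction t with
  | zero =>
      intro a b r h
      rw [PySem.List.pyRange_one_eq_nil (by omega)]
      rw [if_neg (by omega)]
      rfl
  | succ t ih =>
      intro a b r h
      by_cases hab : b ≤ a
      · rw [PySem.List.pyRange_one_eq_nil hab, if_neg (by omega)]
        rfl
      · rw [PySem.List.pyRange_one_cons (by omega), List.flatMap_cons,
            ih (a+1) b r (by omega)]
        by_cases hra : r = a
        · rw [if_pos (by omega), if_neg (by omega), if_pos (by omega)]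
          simp [hra]
        · rw [if_neg (by omega)]
          by_cases hcond : a ≤ r ∧ r < b
          · rw [if_pos (by omega), if_pos hcond]; rfl
          · rw [if_neg (by omega), if_neg hcond]; rfl

theorem gaps_shift (m t : Int) : ∀ (l : List Int) (prev : Int),
    gapsLoop m (prev + t) (l.map (· + t)) = gapsLoop m prev l := by
  intro l
  induction l with
  | nil => intro prev; rfl
  | cons d ds ih =>
      intro prev
      simp only [List.map_cons, gapsLoop]
      have h1 : d + t - (prev + t) - 1 + m = d - prev - 1 + m := by ring
      rw [h1, ih d]

theorem recE_eq (m : Int) : ∀ (k : Nat) (r : Int),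
    recE m (k+1) r =
      if 0 ≤ r - ((k : Int)+1)*m then
        (combs (PySem.List.pyRange 0 (r - ((k : Int)+1)*m + k) 1) k).map
          (fun ds => gapsLoop m (-1) (ds ++ [r - ((k : Int)+1)*m + k]))
      else [] := by
  intro k
  induction k with
  | zero =>
      intro r
      simp only [recE, Nat.cast_zero, zero_mul, sub_zero]
      have h1 : ∀ c : Int, ((if r - c = 0 then ([[]] : List (List Int)) else []).map (fun e => c :: e))
          = if r - c = 0 then ([[c]] : List (List Int)) else [] := by
        intro c; split_ifs <;> rfl
      simp only [h1]
      rw [flatMap_pick (r + 1 - m).toNat m (r+1) r (le_refl _)]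
      by_cases hc : 0 ≤ r - (0+1)*m
      · rw [if_pos (by omega), if_pos hc]
        simp only [combs, List.map_cons, List.map_nil, List.nil_append, gapsLoop]
        norm_num
      · rw [if_neg (by omega), if_neg hc]
  | succ k ih =>
      intro r
      conv_lhs => rw [recE]
      simp only [ih]
      push_cast
      by_cases hS : 0 ≤ r - ((k : Int)+1+1)*m
      · rw [if_pos hS]
        -- n = r - (k+2)m + (k+1)
        have hn : r - ((k : Int)+1+1)*m + (k+1) - k = r - ((k:Int)+1+1)*m + 1 := by ring
        rw [combs_decomp (r - ((k : Int)+1+1)*m + (k+1)).toNat k 0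
              (r - ((k : Int)+1+1)*m + (k+1)) (by omega)]
        rw [List.map_flatMap, hn]
        have hrange : PySem.List.pyRange m (r - ((k:Int)+1) * m + 1) 1
            = (PySem.List.pyRange 0 (r - ((k:Int)+1+1)*m + 1) 1).map (· + m) := by
          have he : r - ((k:Int)+1) * m + 1 = (r - ((k:Int)+1+1)*m + 1) + m := by ring
          rw [he, pyRange_shift0]
        rw [hrange, List.flatMap_map]
        refine flatMap_congr' _ _ _ (fun d hd => ?_)
        rw [PySem.List.mem_pyRange_one] at hd
        show (if (0:Int) ≤ r - (d + m) - ((k:Int)+1)*m then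
            (combs (PySem.List.pyRange 0 (r - (d+m) - ((k:Int)+1)*m + k) 1) k).map
              (fun ds => gapsLoop m (-1) (ds ++ [r - (d+m) - ((k:Int)+1)*m + k]))
          else []).map (fun e => (d+m) :: e) = _
        rw [if_pos (by nlinarith [hd.1, hd.2] : (0:Int) ≤ r - (d + m) - ((k:Int)+1)*m)]
        have hnc : r - (d + m) - ((k:Int)+1)*m + k = r - ((k:Int)+1+1)*m + (k+1) - d - 1 := by
          ring_nf
        rw [hnc]
        have hsh : PySem.List.pyRange (d+1) (r - ((k:Int)+1+1)*m + (k+1)) 1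
            = (PySem.List.pyRange 0 (r - ((k:Int)+1+1)*m + (k+1) - d - 1) 1).map (· + (d+1)) := by
          have he : r - ((k:Int)+1+1)*m + (k+1)
              = (r - ((k:Int)+1+1)*m + (k+1) - d - 1) + (d+1) := by ring
          rw [he, pyRange_shift0]
          congr 1
          ring_nf
        rw [hsh, combs_map]
        simp only [List.map_map]
        refine List.map_congr_left (fun ds _ => ?_)
        simp only [Function.comp_apply, List.cons_append, gapsLoop]
        have hfst : d - (-1) - 1 + m = d + m := by ring
        rw [hfst]
        congr 1
        have := gaps_shift m (d+1) (ds ++ [r - ((k:Int)+1+1)*m + (k+1) - d - 1]) (-1)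
        have hpv : (-1 : Int) + (d+1) = d := by ring
        rw [hpv] at this
        rw [← this]
        simp only [List.map_append, List.map_cons, List.map_nil]
        congr 2
        ring_nf
      · rw [if_neg hS]
        rw [PySem.List.pyRange_one_eq_nil (by nlinarith : r - ((k:Int)+1) * m + 1 ≤ m)]
        rfl

-- ===== VERDICT (by name: the statement is the Claim_ definition above) =====
theorem factorizations_of_power_of_two_py_spec : Claim_equal_factorizations_of_power_of_two_py := by
  intro T L m _ _
  unfold Spec_factorizations_of_power_of_two_py
  unfold factorizations_of_power_of_two_py factorizations_of_power_of_two_py_alt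
  by_cases hL : L ≤ 0
  · simp [hL]
  · rw [if_neg hL, if_neg hL]
    have hk : L.toNat = (L-1).toNat + 1 := by omega
    have hc : (((L-1).toNat : Int)) = L - 1 := by omega
    rw [hk, recA_eq_recE L m ((L-1).toNat + 1) T 0 [] (by push_cast [hc]; ring),
        recE_eq m ((L-1).toNat) T]
    have hLm : T - (((L-1).toNat : Int)+1)*m = T - L*m := by rw [hc]; ring
    have hn : T - (((L-1).toNat : Int)+1)*m + ((L-1).toNat : Int) = T - L*m + L - 1 := by
      rw [hc]; ring
    by_cases hS : T - L * m < 0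
    · rw [if_neg (by omega : ¬ (0 ≤ T - (((L-1).toNat : Int)+1)*m)), if_pos hS]
      rfl
    · rw [if_pos (by omega : (0 ≤ T - (((L-1).toNat : Int)+1)*m)), if_neg hS, hn]
      simp only [List.map_map]
      exact List.map_congr_left (fun ds _ => by simp [Function.comp])
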